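-- pv_equiv track=rewrite | github.com/biprojeetchaudhury/Flame-Game | Flame/app.py | calculate_flame
-- ===== SOURCE A (Python) =====
-- def calculate_flame(name1, name2):
--     x = ["Friendship","Love","Affection","Marriage","Enemity"]
--     y = 0
--
--     name1 = name1.lower()
--     name2 = name2.lower()
--
--     name1 = list(name1)
--     name2 = list(name2)
--
--     name1.sort()
--     name2.sort()
--
--     i = 0
--     j = 0
--
--
--     while i in range(len(name1)) and j in range(len(name2)):
--         if name1[i] == name2[j]:
--             y += 1
--             i += 1
--             j += 1
--         elif name1[i] < name2[j]:
--             i += 1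
--         else:
--             j += 1
--
--     c = len(name1) + len(name2) - 2 * y
--     return x[(c%len(x)) - 1]
-- ===== SOURCE B (Python) =====
-- def calculate_flame(name1, name2):
--     x = ["Friendship", "Love", "Affection", "Marriage", "Enemity"]
--     rest = list(name2.lower())
--     miss = 0
--     for ch in name1.lower():
--         if ch in rest:
--             rest.remove(ch)
--         else:
--             miss += 1
--     c = miss + len(rest)
--     return x[(c % len(x)) - 1]
-- ===== Notes on version B (the rewrite author's own statement) =====
-- stated objective: simpler
-- what changed: Replaces A's sort-both-names-then-two-pointer-merge counting of common letters with a single remove-based cancellation pass over name1 against a shrinking copy of name2's letters (no sorting).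
import Mathlib
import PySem

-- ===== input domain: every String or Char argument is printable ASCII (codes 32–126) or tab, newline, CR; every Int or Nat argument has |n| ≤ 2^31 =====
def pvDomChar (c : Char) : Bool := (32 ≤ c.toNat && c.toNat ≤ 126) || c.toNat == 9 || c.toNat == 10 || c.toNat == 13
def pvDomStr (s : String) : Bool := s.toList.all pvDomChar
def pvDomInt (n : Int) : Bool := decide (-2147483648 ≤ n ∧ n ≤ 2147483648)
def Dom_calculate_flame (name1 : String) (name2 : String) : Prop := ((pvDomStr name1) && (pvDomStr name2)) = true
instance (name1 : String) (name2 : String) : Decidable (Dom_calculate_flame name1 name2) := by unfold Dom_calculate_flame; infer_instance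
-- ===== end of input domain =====

-- B replaces A's sort-then-merge common-letter count by a single remove-based
-- cancellation pass over name1 (objective: simpler — no sorting, one loop).

-- ===== PORT A =====
-- A's while loop over the two sorted lists: advancing i (resp. j) past a
-- matched/smaller element = consuming the head of the corresponding suffix.
def pvMerge : List Char → List Char → Nat → Nat
  | a :: s, b :: t, y =>
    if a = b then pvMerge s t (y + 1)
    else if a < b then pvMerge s (b :: t) y
    else pvMerge (a :: s) t y
  | _, _, y => y
  termination_by l1 l2 _ => l1.length + l2.length
  decreasing_by all_goals (simp only [List.length_cons]; omega)

def calculate_flame (name1 : String) (name2 : String) : String :=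
  let x := ["Friendship", "Love", "Affection", "Marriage", "Enemity"]
  let n1 := PySem.List.sorted (PySem.Str.lower name1).toList (fun c => c) false
  let n2 := PySem.List.sorted (PySem.Str.lower name2).toList (fun c => c) false
  let y := pvMerge n1 n2 0
  let c : Int := (n1.length : Int) + (n2.length : Int) - 2 * (y : Int)
  (PySem.List.pyGet? x (PySem.Int.mod c (x.length : Int) - 1)).getD ""

-- ===== PORT B =====
def calculate_flame_alt (name1 : String) (name2 : String) : String :=
  let x := ["Friendship", "Love", "Affection", "Marriage", "Enemity"]
  let st := (PySem.Str.lower name1).toList.foldl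
    (fun (st : Nat × List Char) ch =>
      if ch ∈ st.2 then (st.1, st.2.erase ch) else (st.1 + 1, st.2))
    (0, (PySem.Str.lower name2).toList)
  let c : Int := (st.1 : Int) + (st.2.length : Int)
  (PySem.List.pyGet? x (PySem.Int.mod c (x.length : Int) - 1)).getD ""

-- ===== PRECONDITION & SPEC =====
def Spec_calculate_flame (name1 : String) (name2 : String) (out : String) : Prop := out = calculate_flame_alt name1 name2
instance (name1 : String) (name2 : String) (out : String) : Decidable (Spec_calculate_flame name1 name2 out) := by unfold Spec_calculate_flame; infer_instance

-- ===== CLAIM (what is proved, stated in full; the proofs are below) =====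
def Claim_equal_calculate_flame : Prop := ∀ (name1 : String) (name2 : String), Dom_calculate_flame name1 name2 → Spec_calculate_flame name1 name2 (calculate_flame name1 name2)

-- ===== LEMMAS AND PROOFS =====

-- A's merge on two (≤)-sorted lists counts the multiset intersection.
theorem pvMerge_eq_inter_card (l1 l2 : List Char) (y : Nat)
    (h1 : l1.Pairwise (· ≤ ·)) (h2 : l2.Pairwise (· ≤ ·)) :
    pvMerge l1 l2 y = y + ((l1 : Multiset Char) ∩ (l2 : Multiset Char)).card := by
  fun_induction pvMerge l1 l2 y with
  | case1 s b t y ih =>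
    rw [ih h1.tail h2.tail]
    have key : ((b :: s : List Char) : Multiset Char) ∩ ((b :: t : List Char) : Multiset Char)
        = b ::ₘ ((s : Multiset Char) ∩ (t : Multiset Char)) := by
      rw [show ((b :: s : List Char) : Multiset Char) = b ::ₘ (s : Multiset Char) from rfl,
          show ((b :: t : List Char) : Multiset Char) = b ::ₘ (t : Multiset Char) from rfl,
          Multiset.cons_inter_of_pos _ (Multiset.mem_cons_self b _),
          Multiset.erase_cons_head]
    rw [key, Multiset.card_cons]
    omega
  | case2 a s b t y hne hlt ih =>
    rw [ih h1.tail h2]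
    have hnot : a ∉ ((b :: t : List Char) : Multiset Char) := by
      intro hmem
      have hba : b ≤ a := by
        rcases List.mem_cons.mp (Multiset.mem_coe.mp hmem) with h | h
        · exact le_of_eq h.symm
        · exact (List.pairwise_cons.mp h2).1 a h
      exact absurd hlt (not_lt.mpr hba)
    rw [show ((a :: s : List Char) : Multiset Char) = a ::ₘ (s : Multiset Char) from rfl,
        Multiset.cons_inter_of_neg _ hnot]
  | case3 a s b t y hne hnlt ih =>
    rw [ih h1 h2.tail]
    have hba : b < a := lt_of_le_of_ne (not_lt.mp hnlt) (fun h => hne h.symm)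
    have hnot : b ∉ ((a :: s : List Char) : Multiset Char) := by
      intro hmem
      have hab : a ≤ b := by
        rcases List.mem_cons.mp (Multiset.mem_coe.mp hmem) with h | h
        · exact le_of_eq h.symm
        · exact (List.pairwise_cons.mp h1).1 b h
      exact absurd hba (not_lt.mpr hab)
    have key : ((a :: s : List Char) : Multiset Char) ∩ ((b :: t : List Char) : Multiset Char)
        = ((a :: s : List Char) : Multiset Char) ∩ ((t : List Char) : Multiset Char) := by
      rw [Multiset.inter_comm,
          show ((b :: t : List Char) : Multiset Char) = b ::ₘ (t : Multiset Char) from rfl,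
          Multiset.cons_inter_of_neg _ hnot, Multiset.inter_comm]
    rw [key]
  | case4 l1 l2 y h =>
    rcases l1 with _ | ⟨a, s⟩
    · simp
    · rcases l2 with _ | ⟨b, t⟩
      · simp
      · exact (h a s b t rfl rfl).elim

-- B's cancellation pass: invariant tying (miss, rest) to the intersection count.
theorem pvCancel_invariant (l : List Char) : ∀ (miss : Nat) (rest : List Char),
    (l.foldl (fun (st : Nat × List Char) ch =>
        if ch ∈ st.2 then (st.1, st.2.erase ch) else (st.1 + 1, st.2)) (miss, rest)).1
    + (l.foldl (fun (st : Nat × List Char) ch =>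
        if ch ∈ st.2 then (st.1, st.2.erase ch) else (st.1 + 1, st.2)) (miss, rest)).2.length
    + 2 * (((l : Multiset Char)) ∩ ((rest : Multiset Char))).card
    = miss + l.length + rest.length := by
  induction l with
  | nil => intro miss rest; simp
  | cons ch l ih =>
    intro miss rest
    rw [List.foldl_cons]
    by_cases hmem : ch ∈ rest
    · simp only [hmem, if_pos]
      have hrec := ih miss (rest.erase ch)
      have key : ((ch :: l : List Char) : Multiset Char) ∩ ((rest : List Char) : Multiset Char)
          = ch ::ₘ ((l : Multiset Char) ∩ ((rest.erase ch : List Char) : Multiset Char)) := by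
        rw [show ((ch :: l : List Char) : Multiset Char) = ch ::ₘ (l : Multiset Char) from rfl,
            Multiset.cons_inter_of_pos _ (Multiset.mem_coe.mpr hmem),
            Multiset.coe_erase]
      have hlen : (rest.erase ch).length + 1 = rest.length := List.length_erase_add_one hmem
      rw [key, Multiset.card_cons]
      simp only [List.length_cons]
      omega
    · simp only [hmem, if_neg, not_false_iff]
      have hrec := ih (miss + 1) rest
      have key : ((ch :: l : List Char) : Multiset Char) ∩ ((rest : List Char) : Multiset Char)
          = (l : Multiset Char) ∩ ((rest : List Char) : Multiset Char) := by
        rw [show ((ch :: l : List Char) : Multiset Char) = ch ::ₘ (l : Multiset Char) from rfl,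
            Multiset.cons_inter_of_neg _ (by simpa using hmem)]
      rw [key]
      simp only [List.length_cons]
      omega

-- ===== VERDICT (by name: the statement is the Claim_ definition above) =====
theorem calculate_flame_spec : Claim_equal_calculate_flame := by
  intro name1 name2 _
  unfold Spec_calculate_flame
  have hs1 := PySem.List.sorted_perm (PySem.Str.lower name1).toList (fun c => c) false
  have hs2 := PySem.List.sorted_perm (PySem.Str.lower name2).toList (fun c => c) false
  have hy := pvMerge_eq_inter_card
      (PySem.List.sorted (PySem.Str.lower name1).toList (fun c => c) false)
      (PySem.List.sorted (PySem.Str.lower name2).toList (fun c => c) false) 0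
      (by simpa using PySem.List.sorted_pairwise (PySem.Str.lower name1).toList (fun c => c))
      (by simpa using PySem.List.sorted_pairwise (PySem.Str.lower name2).toList (fun c => c))
  rw [Multiset.coe_eq_coe.mpr hs1, Multiset.coe_eq_coe.mpr hs2] at hy
  have hinv := pvCancel_invariant (PySem.Str.lower name1).toList 0 (PySem.Str.lower name2).toList
  have hlen1 := hs1.length_eq
  have hlen2 := hs2.length_eq
  have hAB :
      ((PySem.List.sorted (PySem.Str.lower name1).toList (fun c => c) false).length : Int)
        + ((PySem.List.sorted (PySem.Str.lower name2).toList (fun c => c) false).length : Int)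
        - 2 * ((pvMerge (PySem.List.sorted (PySem.Str.lower name1).toList (fun c => c) false)
              (PySem.List.sorted (PySem.Str.lower name2).toList (fun c => c) false) 0 : Nat) : Int)
      = ((((PySem.Str.lower name1).toList.foldl
            (fun (st : Nat × List Char) ch =>
              if ch ∈ st.2 then (st.1, st.2.erase ch) else (st.1 + 1, st.2))
            (0, (PySem.Str.lower name2).toList)).1 : Nat) : Int)
        + ((((PySem.Str.lower name1).toList.foldl
            (fun (st : Nat × List Char) ch =>
              if ch ∈ st.2 then (st.1, st.2.erase ch) else (st.1 + 1, st.2))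
            (0, (PySem.Str.lower name2).toList)).2.length : Nat) : Int) := by
    rw [hy, hlen1, hlen2]
    omega
  simp only [calculate_flame, calculate_flame_alt]
  rw [hAB]
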